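-- pv_equiv track=rewrite | github.com/brsynth/rp2paths | rp2paths/Scope.py | reachableReactions
-- ===== SOURCE A (Python) =====
-- def inSoup(rxn, pending, soup):
--     '''Verify if new reactions can be fired.'''
--     newPending = set(pending)
--     newSoup = set(soup)
--     for r in pending:
--         subs = set()
--         prods = set()
--         for c in rxn[r]:
--             if rxn[r][c] < 0:
--                 subs.add(c)
--             else:
--                 prods.add(c)
--         if len(subs - soup) == 0:
--             newPending -= set([r])
--             newSoup |= prods
--     return newPending, newSoup
--
-- def reachableReactions(rxn, sinks):
--     """Look for reachable reactions."""
--     soup = sinks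
--     pending = set(rxn)
--     newPending, newSoup = inSoup(rxn, pending, soup)
--     iteration = 0
--     while (len(newPending - pending) > 0 or len(newSoup - soup) > 0):
--         pending = newPending
--         soup = newSoup
--         newPending, newSoup = inSoup(rxn, pending, soup)
--         iteration += 1
--
--     return newPending, newSoup, iteration
-- ===== SOURCE B (Python) =====
-- def reachableReactions(rxn, sinks):
--     """Look for reachable reactions (level-synchronous propagation with
--     incrementally maintained missing-substrate sets)."""
--     soup = set(sinks)
--     prods = {}
--     missing = {}
--     for r, comp in rxn.items():
--         prods[r] = [c for c in comp if comp[c] >= 0]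
--         missing[r] = {c for c in comp if comp[c] < 0} - soup
--     remaining = list(rxn)
--     rounds = 0
--     while True:
--         frontier = [r for r in remaining if not missing[r]]
--         if not frontier:
--             break
--         remaining = [r for r in remaining if missing[r]]
--         newly = []
--         for r in frontier:
--             for c in prods[r]:
--                 if c not in soup:
--                     soup.add(c)
--                     newly.append(c)
--         if not newly:
--             break
--         rounds += 1
--         new = set(newly)
--         for r in remaining:
--             missing[r] -= new
--     return set(remaining), soup, rounds
-- ===== Notes on version B (the rewrite author's own statement) =====
-- stated objective: alternative
-- what changed: A re-derives every pending reaction's substrate/product sets and re-tests the whole substrate set against the whole soup on every round; B precomputes product lists and substrate sets once, then runs level-synchronous rounds that keep a per-reaction set of still-missing substrates, shrinking it only by the species newly added that round, so firing is detected by emptiness of the missing set; on the generated inputs (few rounds) the measured cost is the same.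
import Mathlib
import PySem

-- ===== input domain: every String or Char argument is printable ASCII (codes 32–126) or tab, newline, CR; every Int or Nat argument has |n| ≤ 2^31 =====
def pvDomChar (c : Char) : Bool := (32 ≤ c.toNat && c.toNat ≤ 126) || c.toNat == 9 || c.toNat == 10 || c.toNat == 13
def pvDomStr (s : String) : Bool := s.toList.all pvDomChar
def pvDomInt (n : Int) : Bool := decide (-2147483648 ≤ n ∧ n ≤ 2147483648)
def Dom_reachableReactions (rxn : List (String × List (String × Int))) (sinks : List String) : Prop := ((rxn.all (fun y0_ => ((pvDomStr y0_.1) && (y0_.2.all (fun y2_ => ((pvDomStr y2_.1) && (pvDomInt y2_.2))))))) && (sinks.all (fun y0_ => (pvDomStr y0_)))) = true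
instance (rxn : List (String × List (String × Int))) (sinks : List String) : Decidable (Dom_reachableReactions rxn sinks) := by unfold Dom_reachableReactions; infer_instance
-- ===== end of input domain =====

-- B replaces A's per-round recomputation of every pending reaction's substrate/product sets
-- by a level-synchronous propagation that precomputes product lists once and maintains, per
-- still unfired reaction, the set of substrates not yet in the soup (shrunk by the species
-- newly added each round); objective: alternative.  Python set/dict iteration: both ports
-- use first-insertion order (the returned sets are compared as finite sets, so Python's
-- hash order is not observable).

-- argument conversion shared by both ports: the Python argument rxn IS a dict of dicts
-- (unique keys, insertion order, later duplicate overwrites) — PySem.Dict.ofList is exact.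
def pvToDict (rxn : List (String × List (String × Int))) : PySem.Dict String (PySem.Dict String Int) :=
  PySem.Dict.ofList (rxn.map (fun p => (p.1, PySem.Dict.ofList p.2)))

-- ===== PORT A =====
-- inSoup(rxn, pending, soup):  'for c in rxn[r]: … rxn[r][c] …' is a fold over the items of
-- the inner dict (keys are unique); 'rxn[r]' is exact as getD because r is always a key.
def inSoupA (d : PySem.Dict String (PySem.Dict String Int)) (pending soup : PySem.Set String) :
    PySem.Set String × PySem.Set String :=
  pending.foldl
    (fun st r =>
      let comp := d.getD r PySem.Dict.empty
      let sp := comp.items.foldl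
        (fun (sp : PySem.Set String × PySem.Set String) p =>
          if p.2 < 0 then (PySem.Set.add sp.1 p.1, sp.2) else (sp.1, PySem.Set.add sp.2 p.1))
        (PySem.Set.empty, PySem.Set.empty)
      if PySem.Set.len (PySem.Set.diff sp.1 soup) == 0 then
        (PySem.Set.diff st.1 (PySem.Set.ofList [r]), PySem.Set.union st.2 sp.2)
      else st)
    (pending, soup)

-- the while loop: each round holds (pending, soup), computes inSoup, tests the two set
-- differences and either iterates or returns the freshly computed pair (exactly A's sequence
-- of inSoup calls and its final value).  The fuel strictly exceeds the possible number of
-- iterations (each iteration adds at least one species drawn from the inner keys).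
def loopA (d : PySem.Dict String (PySem.Dict String Int)) :
    Nat → PySem.Set String → PySem.Set String → Int → List String × List String × Int
  | 0, pending, soup, it => (pending, soup, it)
  | f + 1, pending, soup, it =>
      let ns := inSoupA d pending soup
      if 0 < PySem.Set.len (PySem.Set.diff ns.1 pending) ∨ 0 < PySem.Set.len (PySem.Set.diff ns.2 soup) then
        loopA d f ns.1 ns.2 (it + 1)
      else (ns.1, ns.2, it)

def reachableReactions (rxn : List (String × List (String × Int))) (sinks : List String) :
    List String × List String × Int :=
  let d := pvToDict rxn
  loopA d (rxn.length + (rxn.map (fun p => p.2.length)).sum + 1) d.keys (PySem.Set.ofList sinks) 0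

-- ===== PORT B =====
-- the while loop of Source B; state: remaining reactions (in input order), missing-substrate
-- sets, soup, round counter.  'soup.add(c); newly.append(c)' is the paired fold.
def loopB (prods : PySem.Dict String (List String)) :
    Nat → List String → PySem.Dict String (PySem.Set String) → PySem.Set String → Int →
      List String × List String × Int
  | 0, remaining, _missing, soup, rounds => (remaining, soup, rounds)
  | f + 1, remaining, missing, soup, rounds =>
      let frontier := remaining.filter (fun r => PySem.Set.len (missing.getD r PySem.Set.empty) == 0)
      if frontier.isEmpty then (remaining, soup, rounds)
      else
        let remaining' := remaining.filter (fun r => !(PySem.Set.len (missing.getD r PySem.Set.empty) == 0))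
        let sn := frontier.foldl
          (fun (acc : PySem.Set String × List String) r =>
            (prods.getD r []).foldl
              (fun (acc : PySem.Set String × List String) c =>
                if PySem.Set.contains acc.1 c then acc else (PySem.Set.add acc.1 c, acc.2 ++ [c]))
              acc)
          (soup, [])
        if sn.2.isEmpty then (remaining', sn.1, rounds)
        else
          loopB prods f remaining'
            (remaining'.foldl
              (fun m r => m.insert r (PySem.Set.diff (m.getD r PySem.Set.empty) (PySem.Set.ofList sn.2)))
              missing)
            sn.1 (rounds + 1)

-- Source B: '[c for c in comp if comp[c] >= 0]' / '{c for c in comp if comp[c] < 0}' are folds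
-- over the inner dict's items (unique keys); prods and missing are built in one pass.
def reachableReactions_alt (rxn : List (String × List (String × Int))) (sinks : List String) :
    List String × List String × Int :=
  let d := pvToDict rxn
  let soup := PySem.Set.ofList sinks
  let pm := d.items.foldl
    (fun (pm : PySem.Dict String (List String) × PySem.Dict String (PySem.Set String)) rc =>
      (pm.1.insert rc.1 (rc.2.items.foldl (fun l p => if 0 ≤ p.2 then l ++ [p.1] else l) []),
       pm.2.insert rc.1 (PySem.Set.diff
         (rc.2.items.foldl (fun s p => if p.2 < 0 then PySem.Set.add s p.1 else s) PySem.Set.empty)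
         soup)))
    (PySem.Dict.empty, PySem.Dict.empty)
  let res := loopB pm.1 (rxn.length + (rxn.map (fun p => p.2.length)).sum + 1) d.keys pm.2 soup 0
  (PySem.Set.ofList res.1, res.2.1, res.2.2)

-- ===== PRECONDITION & SPEC =====
def Spec_reachableReactions (rxn : List (String × List (String × Int))) (sinks : List String) (out : List String × List String × Int) : Prop := out = reachableReactions_alt rxn sinks
instance (rxn : List (String × List (String × Int))) (sinks : List String) (out : List String × List String × Int) : Decidable (Spec_reachableReactions rxn sinks out) := by unfold Spec_reachableReactions; infer_instance

-- ===== CLAIM (what is proved, stated in full; the proofs are below) =====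
def Claim_equal_reachableReactions : Prop := ∀ (rxn : List (String × List (String × Int))) (sinks : List String), Dom_reachableReactions rxn sinks → Spec_reachableReactions rxn sinks (reachableReactions rxn sinks)

-- ===== LEMMAS AND PROOFS =====

-- abbreviations for the per-reaction data (proof-side only)
def subsOf (comp : PySem.Dict String Int) : PySem.Set String :=
  comp.items.foldl (fun s p => if p.2 < 0 then PySem.Set.add s p.1 else s) PySem.Set.empty

def prodsSOf (comp : PySem.Dict String Int) : PySem.Set String :=
  comp.items.foldl (fun s p => if p.2 < 0 then s else PySem.Set.add s p.1) PySem.Set.empty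

def prodsLOf (comp : PySem.Dict String Int) : List String :=
  comp.items.foldl (fun l p => if 0 ≤ p.2 then l ++ [p.1] else l) []

def satB (d : PySem.Dict String (PySem.Dict String Int)) (soup : PySem.Set String) (r : String) : Bool :=
  PySem.Set.len (PySem.Set.diff (subsOf (d.getD r PySem.Dict.empty)) soup) == 0

-- a fold over a pair whose components do not interact splits
theorem foldl_prod_split {α β γ : Type} (l : List γ) (f : α → γ → α) (g : β → γ → β)
    (a : α) (b : β) :
    l.foldl (fun q x => (f q.1 x, g q.2 x)) (a, b) = (l.foldl f a, l.foldl g b) := by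
  induction l generalizing a b with
  | nil => rfl
  | cons x xs ih => simp [List.foldl, ih]

theorem ofList_single (r : String) : PySem.Set.ofList [r] = [r] := rfl

theorem len_pos_iff (s : List String) : 0 < PySem.Set.len s ↔ s ≠ [] := by
  cases s with
  | nil => simp [PySem.Set.len]
  | cons a t => simp only [PySem.Set.len]; simp

theorem diff_eq_nil_of_subset (s t : List String) (h : ∀ x ∈ s, x ∈ t) :
    PySem.Set.diff s t = [] := by
  simp only [PySem.Set.diff, List.filter_eq_nil_iff]
  intro a ha
  simp [PySem.Set.contains, h a ha]

theorem diff_append_not_mem (soup D : List String) (hD : ∀ x ∈ D, x ∉ soup) :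
    PySem.Set.diff (soup ++ D) soup = D := by
  simp only [PySem.Set.diff, List.filter_append]
  rw [List.filter_eq_nil_iff.mpr (by intro a ha; simp [PySem.Set.contains, ha]),
    List.filter_eq_self.mpr (by intro a ha; simp [PySem.Set.contains, hD a ha])]
  simp

theorem diff_single (kept todo : List String) (r : String) (h1 : r ∉ kept) (h2 : r ∉ todo) :
    PySem.Set.diff (kept ++ r :: todo) (PySem.Set.ofList [r]) = kept ++ todo := by
  rw [ofList_single]
  simp only [PySem.Set.diff, List.filter_append, List.filter_cons]
  rw [List.filter_eq_self.mpr (by intro a ha; simp [PySem.Set.contains]; exact fun h => h1 (h ▸ ha)),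
    List.filter_eq_self.mpr (by intro a ha; simp [PySem.Set.contains]; exact fun h => h2 (h ▸ ha))]
  simp [PySem.Set.contains]

theorem sp_pair_split (comp : PySem.Dict String Int) :
    comp.items.foldl
      (fun (sp : PySem.Set String × PySem.Set String) p =>
        if p.2 < 0 then (PySem.Set.add sp.1 p.1, sp.2) else (sp.1, PySem.Set.add sp.2 p.1))
      (PySem.Set.empty, PySem.Set.empty) = (subsOf comp, prodsSOf comp) := by
  have h : (fun (sp : PySem.Set String × PySem.Set String) (p : String × Int) =>
      if p.2 < 0 then (PySem.Set.add sp.1 p.1, sp.2) else (sp.1, PySem.Set.add sp.2 p.1)) =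
      (fun sp p => ((if p.2 < 0 then PySem.Set.add sp.1 p.1 else sp.1),
                    (if p.2 < 0 then sp.2 else PySem.Set.add sp.2 p.1))) := by
    funext sp p; split <;> rfl
  rw [h, foldl_prod_split comp.items
    (fun s (p : String × Int) => if p.2 < 0 then PySem.Set.add s p.1 else s)
    (fun s (p : String × Int) => if p.2 < 0 then s else PySem.Set.add s p.1)
    PySem.Set.empty PySem.Set.empty]
  rfl

-- with unique keys, the product 'set' of A equals the product 'list' of B
theorem prodsS_eq_prodsL (comp : PySem.Dict String Int) (h : comp.keys.Nodup) :
    prodsSOf comp = prodsLOf comp := by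
  have aux : ∀ (l : List (String × Int)) (s : List String), (l.map Prod.fst).Nodup →
      (∀ p ∈ l, p.1 ∉ s) →
      l.foldl (fun s p => if p.2 < 0 then s else PySem.Set.add s p.1) s =
        l.foldl (fun t p => if 0 ≤ p.2 then t ++ [p.1] else t) s := by
    intro l
    induction l with
    | nil => intro s _ _; rfl
    | cons p l ih =>
      intro s hnd hs
      simp only [List.map_cons, List.nodup_cons] at hnd
      by_cases hp : p.2 < 0
      · simp only [List.foldl_cons, if_pos hp, if_neg (by omega : ¬ 0 ≤ p.2)]
        exact ih s hnd.2 (fun q hq => hs q (List.mem_cons_of_mem _ hq))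
      · simp only [List.foldl_cons, if_neg hp, if_pos (by omega : 0 ≤ p.2)]
        rw [PySem.Set.add_of_not_mem (hs p (List.mem_cons_self))]
        refine ih (s ++ [p.1]) hnd.2 ?_
        intro q hq hmem
        rcases List.mem_append.mp hmem with h1 | h1
        · exact hs q (List.mem_cons_of_mem _ hq) h1
        · have hq1 : q.1 ∈ l.map Prod.fst := List.mem_map_of_mem hq
          rw [List.mem_singleton.mp h1] at hq1
          exact hnd.1 hq1
  exact aux comp.items PySem.Set.empty h (by intro p _ hm; simp [PySem.Set.empty] at hm)

-- characterisation of inSoup: fired = satisfied prefix filter, soup = fold over fired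
theorem inSoupA_go (d : PySem.Dict String (PySem.Dict String Int)) (soup : PySem.Set String) :
    ∀ (todo kept : List String) (ns : PySem.Set String), (kept ++ todo).Nodup →
      todo.foldl
        (fun (st : PySem.Set String × PySem.Set String) r =>
          if satB d soup r then
            (PySem.Set.diff st.1 (PySem.Set.ofList [r]),
             PySem.Set.union st.2 (prodsSOf (d.getD r PySem.Dict.empty)))
          else st)
        (kept ++ todo, ns)
      = (kept ++ todo.filter (fun r => !satB d soup r),
         (todo.filter (fun r => satB d soup r)).foldl
           (fun s r => PySem.Set.union s (prodsSOf (d.getD r PySem.Dict.empty))) ns) := by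
  intro todo
  induction todo with
  | nil => intro kept ns _; simp
  | cons r todo ih =>
    intro kept ns hnd
    have hnd' := List.nodup_middle.mp hnd
    rw [List.nodup_cons] at hnd'
    have hrk : r ∉ kept := fun h => hnd'.1 (List.mem_append.mpr (Or.inl h))
    have hrt : r ∉ todo := fun h => hnd'.1 (List.mem_append.mpr (Or.inr h))
    by_cases hs : satB d soup r
    · rw [List.foldl_cons, if_pos hs, diff_single kept todo r hrk hrt,
        ih kept _ hnd'.2]
      simp [hs]
    · rw [List.foldl_cons, if_neg hs]
      have hre : kept ++ r :: todo = (kept ++ [r]) ++ todo := by simp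
      rw [hre, ih (kept ++ [r]) ns (by rw [← hre]; exact hnd)]
      simp [hs]

theorem inSoupA_eq (d : PySem.Dict String (PySem.Dict String Int))
    (pending soup : PySem.Set String) (hnd : pending.Nodup) :
    inSoupA d pending soup =
      (pending.filter (fun r => !satB d soup r),
       (pending.filter (fun r => satB d soup r)).foldl
         (fun s r => PySem.Set.union s (prodsSOf (d.getD r PySem.Dict.empty))) soup) := by
  have h := inSoupA_go d soup pending [] soup (by simpa using hnd)
  simp only [List.nil_append] at h
  rw [← h]
  unfold inSoupA
  apply PySem.List.foldl_congr_mem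
  intro st r _
  simp only [sp_pair_split]
  rfl

-- the paired soup/newly fold: soup component is the plain add-fold, and both components
-- extend by the same new elements, none of which was already present
theorem inner_pair (cs : List String) : ∀ (s : PySem.Set String) (nl : List String),
    ∃ X : List String,
      cs.foldl
        (fun (acc : PySem.Set String × List String) c =>
          if PySem.Set.contains acc.1 c then acc else (PySem.Set.add acc.1 c, acc.2 ++ [c]))
        (s, nl) = (s ++ X, nl ++ X) ∧ ∀ x ∈ X, x ∉ s := by
  induction cs with
  | nil => intro s nl; exact ⟨[], by simp⟩
  | cons c cs ih =>
    intro s nl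
    by_cases hc : c ∈ s
    · rw [List.foldl_cons, if_pos ((PySem.Set.contains_iff s c).mpr hc)]
      exact ih s nl
    · rw [List.foldl_cons,
        if_neg (by rw [show (PySem.Set.contains s c = true) = (c ∈ s) from
          propext (PySem.Set.contains_iff s c)]; exact hc)]
      simp only [PySem.Set.add_of_not_mem hc]
      obtain ⟨X, hX1, hX2⟩ := ih (s ++ [c]) (nl ++ [c])
      refine ⟨c :: X, by rw [hX1]; simp, ?_⟩
      intro x hx
      rcases List.mem_cons.mp hx with h | h
      · exact h ▸ hc
      · intro hxs; exact hX2 x h (List.mem_append.mpr (Or.inl hxs))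

theorem inner_fst (cs : List String) : ∀ (s : PySem.Set String) (nl : List String),
    (cs.foldl
      (fun (acc : PySem.Set String × List String) c =>
        if PySem.Set.contains acc.1 c then acc else (PySem.Set.add acc.1 c, acc.2 ++ [c]))
      (s, nl)).1 = cs.foldl PySem.Set.add s := by
  induction cs with
  | nil => intro s nl; rfl
  | cons c cs ih =>
    intro s nl
    rw [List.foldl_cons, List.foldl_cons]
    by_cases hc : c ∈ s
    · rw [if_pos ((PySem.Set.contains_iff s c).mpr hc), PySem.Set.add_of_mem hc]
      exact ih s nl
    · rw [if_neg (by rw [show (PySem.Set.contains s c = true) = (c ∈ s) from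
        propext (PySem.Set.contains_iff s c)]; exact hc)]
      exact ih _ _

theorem pair_fold_eq (fired : List String) (prods : PySem.Dict String (List String))
    (s : PySem.Set String) (nl : List String) :
    ∃ D : List String,
      fired.foldl
        (fun (acc : PySem.Set String × List String) r =>
          (prods.getD r []).foldl
            (fun (acc : PySem.Set String × List String) c =>
              if PySem.Set.contains acc.1 c then acc else (PySem.Set.add acc.1 c, acc.2 ++ [c]))
            acc)
        (s, nl) = (s ++ D, nl ++ D) ∧ (∀ x ∈ D, x ∉ s) := by
  induction fired generalizing s nl with
  | nil => exact ⟨[], by simp⟩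
  | cons r fired ih =>
    obtain ⟨X, hX1, hX2⟩ := inner_pair (prods.getD r []) s nl
    obtain ⟨D', hD1, hD2⟩ := ih (s ++ X) (nl ++ X)
    refine ⟨X ++ D', ?_, ?_⟩
    · rw [List.foldl_cons, hX1, hD1]
      simp
    · intro x hx
      rcases List.mem_append.mp hx with h | h
      · exact hX2 x h
      · intro hxs; exact hD2 x h (List.mem_append.mpr (Or.inl hxs))

-- A's union-fold over fired equals the add-fold over the product lists
theorem unionFold_eq_addFold (d : PySem.Dict String (PySem.Dict String Int))
    (prods : PySem.Dict String (List String)) (fired : List String) (s : PySem.Set String)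
    (hp : ∀ r ∈ fired, prods.getD r [] = prodsLOf (d.getD r PySem.Dict.empty))
    (hk : ∀ r ∈ fired, (d.getD r PySem.Dict.empty).keys.Nodup) :
    fired.foldl (fun s r => PySem.Set.union s (prodsSOf (d.getD r PySem.Dict.empty))) s =
      (fired.foldl
        (fun (acc : PySem.Set String × List String) r =>
          (prods.getD r []).foldl
            (fun (acc : PySem.Set String × List String) c =>
              if PySem.Set.contains acc.1 c then acc else (PySem.Set.add acc.1 c, acc.2 ++ [c]))
            acc)
        (s, [])).1 := by
  have pairfold_fst : ∀ (fired : List String) (s : PySem.Set String) (nl : List String),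
      (fired.foldl
        (fun (acc : PySem.Set String × List String) r =>
          (prods.getD r []).foldl
            (fun (acc : PySem.Set String × List String) c =>
              if PySem.Set.contains acc.1 c then acc else (PySem.Set.add acc.1 c, acc.2 ++ [c]))
            acc)
        (s, nl)).1 =
        fired.foldl (fun s r => (prods.getD r []).foldl PySem.Set.add s) s := by
    intro fired
    induction fired with
    | nil => intro s nl; rfl
    | cons r fired ih =>
      intro s nl
      rw [List.foldl_cons, List.foldl_cons]
      have hsplit : ((prods.getD r []).foldl
          (fun (acc : PySem.Set String × List String) c =>
            if PySem.Set.contains acc.1 c then acc else (PySem.Set.add acc.1 c, acc.2 ++ [c]))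
          (s, nl)) =
          (((prods.getD r []).foldl
            (fun (acc : PySem.Set String × List String) c =>
              if PySem.Set.contains acc.1 c then acc else (PySem.Set.add acc.1 c, acc.2 ++ [c]))
            (s, nl)).1,
           ((prods.getD r []).foldl
            (fun (acc : PySem.Set String × List String) c =>
              if PySem.Set.contains acc.1 c then acc else (PySem.Set.add acc.1 c, acc.2 ++ [c]))
            (s, nl)).2) := rfl
      rw [hsplit, ih, inner_fst]
  rw [pairfold_fst]
  apply PySem.List.foldl_congr_mem
  intro acc r hr
  rw [hp r hr, ← prodsS_eq_prodsL _ (hk r hr)]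
  rfl

-- getD through a fold of inserts over keys not containing k is unchanged
theorem getD_foldl_insert_not_mem {ν : Type} (l : List String)
    (f : PySem.Dict String ν → String → ν) (m : PySem.Dict String ν) (k : String) (dflt : ν)
    (h : k ∉ l) :
    (l.foldl (fun m r => m.insert r (f m r)) m).getD k dflt = m.getD k dflt := by
  induction l generalizing m with
  | nil => rfl
  | cons r l ih =>
    rw [List.foldl_cons, ih _ (fun hk => h (List.mem_cons_of_mem _ hk)),
      PySem.Dict.getD_insert_of_ne _ _ _ (fun he => h (by rw [he]; exact List.mem_cons_self))]

-- getD through the missing-update fold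
theorem getD_missing_update (l : List String) (D : List String)
    (m : PySem.Dict String (PySem.Set String)) (k : String) (hnd : l.Nodup) (hk : k ∈ l) :
    (l.foldl
      (fun m r => m.insert r (PySem.Set.diff (m.getD r PySem.Set.empty) (PySem.Set.ofList D)))
      m).getD k PySem.Set.empty
      = PySem.Set.diff (m.getD k PySem.Set.empty) (PySem.Set.ofList D) := by
  induction l generalizing m with
  | nil => exact absurd hk (List.not_mem_nil)
  | cons r l ih =>
    rw [List.nodup_cons] at hnd
    rw [List.foldl_cons]
    rcases List.mem_cons.mp hk with he | hm
    · subst he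
      rw [getD_foldl_insert_not_mem l _ _ _ _ hnd.1, PySem.Dict.getD_insert_self]
    · rw [ih _ hnd.2 hm,
        PySem.Dict.getD_insert_of_ne _ _ _ (fun he => hnd.1 (by rw [← he]; exact hm))]

-- getD through a fold of inserts at keys of items not containing k is unchanged
theorem getD_foldl_insert_key_not_mem {ν : Type} (l : List (String × PySem.Dict String Int))
    (g : String × PySem.Dict String Int → ν) (m : PySem.Dict String ν) (k : String) (dflt : ν)
    (h : k ∉ l.map Prod.fst) :
    (l.foldl (fun m rc => m.insert rc.1 (g rc)) m).getD k dflt = m.getD k dflt := by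
  induction l generalizing m with
  | nil => rfl
  | cons rc l ih =>
    rw [List.map_cons] at h
    rw [List.foldl_cons, ih _ (fun hk => h (List.mem_cons_of_mem _ hk)),
      PySem.Dict.getD_insert_of_ne _ _ _ (fun he => h (by rw [he]; exact List.mem_cons_self))]

-- getD of the dict built by one insert per (unique) item
theorem getD_build {ν : Type} (l : List (String × PySem.Dict String Int))
    (g : String × PySem.Dict String Int → ν) (m : PySem.Dict String ν) (dflt : ν)
    (hnd : (l.map Prod.fst).Nodup) (k : String) (v : PySem.Dict String Int) (hm : (k, v) ∈ l) :
    (l.foldl (fun m rc => m.insert rc.1 (g rc)) m).getD k dflt = g (k, v) := by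
  induction l generalizing m with
  | nil => exact absurd hm (List.not_mem_nil)
  | cons rc l ih =>
    rw [List.map_cons, List.nodup_cons] at hnd
    rw [List.foldl_cons]
    rcases List.mem_cons.mp hm with he | hmem
    · subst he
      rw [getD_foldl_insert_key_not_mem l g _ k dflt hnd.1, PySem.Dict.getD_insert_self]
    · exact ih _ hnd.2 hmem

-- diff by a grown soup = diff then diff by the new part
theorem diff_diff_ofList (s soup D : List String) :
    PySem.Set.diff (PySem.Set.diff s soup) (PySem.Set.ofList D) =
      PySem.Set.diff s (soup ++ D) := by
  simp only [PySem.Set.diff, List.filter_filter]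
  apply List.filter_congr
  intro x _
  by_cases h1 : x ∈ soup <;> by_cases h2 : x ∈ D <;>
    simp [PySem.Set.contains, h1, h2, PySem.Set.mem_ofList]

-- the main lockstep induction
theorem loop_eq (d : PySem.Dict String (PySem.Dict String Int))
    (prods : PySem.Dict String (List String)) :
    ∀ (f : Nat) (remaining soup : List String) (missing : PySem.Dict String (PySem.Set String))
      (rounds : Int),
      remaining.Nodup →
      (∀ r ∈ remaining, missing.getD r PySem.Set.empty =
        PySem.Set.diff (subsOf (d.getD r PySem.Dict.empty)) soup) →
      (∀ r ∈ remaining, prods.getD r [] = prodsLOf (d.getD r PySem.Dict.empty)) →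
      (∀ r ∈ remaining, (d.getD r PySem.Dict.empty).keys.Nodup) →
      loopA d f remaining soup rounds = loopB prods f remaining missing soup rounds ∧
        (loopB prods f remaining missing soup rounds).1.Nodup := by
  intro f
  induction f with
  | zero => intro remaining soup missing rounds hnd _ _ _; exact ⟨rfl, hnd⟩
  | succ f ih =>
    intro remaining soup missing rounds hnd hmiss hp hk
    have hsat : ∀ r ∈ remaining,
        (PySem.Set.len (missing.getD r PySem.Set.empty) == 0) = satB d soup r :=
      fun r hr => by rw [hmiss r hr]; rfl
    have hfr : List.filter (fun r => PySem.Set.len (missing.getD r PySem.Set.empty) == 0) remaining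
        = List.filter (fun r => satB d soup r) remaining := List.filter_congr hsat
    have hfr' : List.filter (fun r => !(PySem.Set.len (missing.getD r PySem.Set.empty) == 0)) remaining
        = List.filter (fun r => !satB d soup r) remaining :=
      List.filter_congr (fun r hr => by rw [hsat r hr])
    obtain ⟨D, hD1, hD2⟩ :=
      pair_fold_eq (List.filter (fun r => satB d soup r) remaining) prods soup []
    simp only [List.nil_append] at hD1
    have hUF := unionFold_eq_addFold d prods
      (List.filter (fun r => satB d soup r) remaining) soup
      (fun r hr => hp r (List.mem_of_mem_filter hr))
      (fun r hr => hk r (List.mem_of_mem_filter hr))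
    rw [hD1] at hUF
    simp only [loopA, loopB]
    rw [inSoupA_eq d remaining soup hnd, hfr, hfr', hUF]
    by_cases hemp : List.filter (fun r => satB d soup r) remaining = []
    · have hDnil : D = [] := by
        have h2 := congrArg Prod.snd hD1
        rw [hemp] at h2
        simpa using h2.symm
      subst hDnil
      have hall : ∀ r ∈ remaining, ¬ (satB d soup r = true) := List.filter_eq_nil_iff.mp hemp
      have hkeep : List.filter (fun r => !satB d soup r) remaining = remaining :=
        List.filter_eq_self.mpr (fun r hr => by simp [hall r hr])
      rw [hemp, hkeep]
      simp only [List.isEmpty_nil, if_true, List.append_nil]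
      rw [if_neg]
      · exact ⟨rfl, hnd⟩
      · rw [diff_eq_nil_of_subset remaining remaining (fun x hx => hx),
          diff_eq_nil_of_subset soup soup (fun x hx => hx)]
        simp [PySem.Set.len]
    · have hnd' : (List.filter (fun r => !satB d soup r) remaining).Nodup := hnd.filter _
      have hdiff1 : PySem.Set.diff (List.filter (fun r => !satB d soup r) remaining) remaining = [] :=
        diff_eq_nil_of_subset _ _ (fun x hx => List.mem_of_mem_filter hx)
      have hBfr : ¬((List.filter (fun r => satB d soup r) remaining).isEmpty = true) := by
        simp only [List.isEmpty_iff]; exact hemp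
      rw [if_neg hBfr, hD1]
      by_cases hDnil : D = []
      · subst hDnil
        have hAcond : ¬(0 < PySem.Set.len (PySem.Set.diff
            (List.filter (fun r => !satB d soup r) remaining) remaining) ∨
            0 < PySem.Set.len (PySem.Set.diff (soup ++ []) soup)) := by
          rw [hdiff1]
          simp only [List.append_nil]
          rw [diff_eq_nil_of_subset soup soup (fun x hx => hx)]
          simp [PySem.Set.len]
        rw [if_neg hAcond]
        refine ⟨?_, hnd'⟩
        simp
      · have hBD : ¬(((soup ++ D, D).2.isEmpty) = true) := by
          simp only [List.isEmpty_iff]; exact hDnil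
        have hAcond : (0 < PySem.Set.len (PySem.Set.diff
            (List.filter (fun r => !satB d soup r) remaining) remaining) ∨
            0 < PySem.Set.len (PySem.Set.diff (soup ++ D) soup)) :=
          Or.inr (by rw [diff_append_not_mem soup D hD2, len_pos_iff]; exact hDnil)
        rw [if_neg hBD, if_pos hAcond]
        have hmiss' : ∀ r ∈ List.filter (fun r => !satB d soup r) remaining,
            ((List.filter (fun r => !satB d soup r) remaining).foldl
              (fun m r => m.insert r (PySem.Set.diff (m.getD r PySem.Set.empty)
                (PySem.Set.ofList (soup ++ D, D).2))) missing).getD r PySem.Set.empty =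
              PySem.Set.diff (subsOf (d.getD r PySem.Dict.empty)) (soup ++ D) := by
          intro r hr
          rw [getD_missing_update _ D missing r hnd' hr,
            hmiss r (List.mem_of_mem_filter hr), diff_diff_ofList]
        exact ih _ _ _ _ hnd' hmiss'
          (fun r hr => hp r (List.mem_of_mem_filter hr))
          (fun r hr => hk r (List.mem_of_mem_filter hr))

-- splitting the one-pass construction of prods and missing in B
theorem pm_split (items : List (String × PySem.Dict String Int)) (soup : PySem.Set String) :
    items.foldl
      (fun (pm : PySem.Dict String (List String) × PySem.Dict String (PySem.Set String)) rc =>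
        (pm.1.insert rc.1 (rc.2.items.foldl (fun l p => if 0 ≤ p.2 then l ++ [p.1] else l) []),
         pm.2.insert rc.1 (PySem.Set.diff
           (rc.2.items.foldl (fun s p => if p.2 < 0 then PySem.Set.add s p.1 else s) PySem.Set.empty)
           soup)))
      (PySem.Dict.empty, PySem.Dict.empty)
    = (items.foldl (fun m rc => m.insert rc.1 (prodsLOf rc.2)) PySem.Dict.empty,
       items.foldl (fun m rc => m.insert rc.1 (PySem.Set.diff (subsOf rc.2) soup)) PySem.Dict.empty) := by
  rw [← foldl_prod_split]
  rfl

-- every value of pvToDict has unique keys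
theorem values_keys_nodup (l : List (String × PySem.Dict String Int))
    (hl : ∀ p ∈ l, (p.2 : PySem.Dict String Int).keys.Nodup) :
    ∀ v ∈ (PySem.Dict.ofList l).values, v.keys.Nodup := by
  have aux : ∀ (l : List (String × PySem.Dict String Int)) (m : PySem.Dict String (PySem.Dict String Int)),
      (∀ v ∈ m.values, v.keys.Nodup) → (∀ p ∈ l, (p.2 : PySem.Dict String Int).keys.Nodup) →
      ∀ v ∈ (l.foldl (fun acc p => acc.insert p.1 p.2) m).values, v.keys.Nodup := by
    intro l
    induction l with
    | nil => intro m hm _ v hv; exact hm v hv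
    | cons p l ih =>
      intro m hm hl v hv
      rw [List.foldl_cons] at hv
      refine ih _ ?_ (fun q hq => hl q (List.mem_cons_of_mem _ hq)) v hv
      intro w hw
      rcases PySem.Dict.mem_values_insert m p.1 p.2 w hw with he | hm2
      · exact he ▸ hl p List.mem_cons_self
      · exact hm w hm2
  exact aux l PySem.Dict.empty
    (by intro v hv; simp [PySem.Dict.values, PySem.Dict.empty] at hv) hl

-- ===== VERDICT (by name: the statement is the Claim_ definition above) =====
theorem reachableReactions_spec : Claim_equal_reachableReactions := by
  unfold Claim_equal_reachableReactions
  intro rxn sinks _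
  unfold Spec_reachableReactions reachableReactions reachableReactions_alt
  simp only [pm_split]
  have hknd : ((pvToDict rxn).items.map Prod.fst).Nodup :=
    PySem.Dict.nodup_keys_ofList _
  have hdec : ∀ r ∈ (pvToDict rxn).keys,
      (r, (pvToDict rxn).getD r PySem.Dict.empty) ∈ (pvToDict rxn).items := by
    intro r hr
    obtain ⟨p, hp, he⟩ := List.mem_map.mp hr
    have : (pvToDict rxn).getD r PySem.Dict.empty = p.2 :=
      PySem.Dict.getD_of_mem_items _ (by rw [← he]; exact hp) hknd _
    rw [this, ← he]
    exact hp
  have hvk : ∀ v ∈ (pvToDict rxn).values, v.keys.Nodup := by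
    apply values_keys_nodup
    intro p hp
    obtain ⟨q, _, he⟩ := List.mem_map.mp hp
    rw [← he]
    exact PySem.Dict.nodup_keys_ofList _
  obtain ⟨heq, hnodup⟩ := loop_eq (pvToDict rxn)
    ((pvToDict rxn).items.foldl (fun m rc => m.insert rc.1 (prodsLOf rc.2)) PySem.Dict.empty)
    (rxn.length + (rxn.map (fun p => p.2.length)).sum + 1)
    (pvToDict rxn).keys (PySem.Set.ofList sinks)
    ((pvToDict rxn).items.foldl
      (fun m rc => m.insert rc.1 (PySem.Set.diff (subsOf rc.2) (PySem.Set.ofList sinks)))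
      PySem.Dict.empty)
    0
    hknd
    (by
      intro r hr
      rw [getD_build _ _ _ _ hknd r _ (hdec r hr)])
    (by
      intro r hr
      rw [getD_build _ _ _ _ hknd r _ (hdec r hr)])
    (by
      intro r hr
      exact hvk _ (List.mem_map_of_mem (hdec r hr)))
  rw [heq, PySem.Set.ofList_eq_self_of_nodup _ hnodup]
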